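-- pv_equiv track=rewrite | github.com/wafflejuice/problem-solving-practice | programmers/kakao-blind-2018-1/2_다트_게임.py | parse
-- ===== SOURCE A (Python) =====
-- def parse(dartResult):
--     result = []
--     prev_last = -1
--     for i in range(len(dartResult)):
--         if dartResult[i] in ['S', 'D', 'T']:
--             if i+1 < len(dartResult) and dartResult[i+1] in ['*', '#']:
--                 if prev_last == -1:
--                     result.append(dartResult[:i+1+1])
--                 else:
--                     result.append(dartResult[prev_last+1:i + 1 + 1])
--                 prev_last = i+1
--             else:
--                 if prev_last == -1:
--                     result.append(dartResult[:i + 1])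
--                 else:
--                     result.append(dartResult[prev_last+1:i + 1])
--                 prev_last = i
--     return result
-- ===== SOURCE B (Python) =====
-- def parse(dartResult):
--     tokens = []
--     buf = ""
--     pending = False
--     for ch in dartResult:
--         if pending:
--             if ch in '*#':
--                 tokens.append(buf + ch)
--                 buf = ""
--                 pending = False
--                 continue
--             tokens.append(buf)
--             buf = ""
--         buf += ch
--         pending = ch in 'SDT'
--     if pending:
--         tokens.append(buf)
--     return tokens
-- ===== Notes on version B (the rewrite author's own statement) =====
-- stated objective: alternative
-- what changed: Replaces A's index-based scan with lookahead and prev_last/slice bookkeeping by a one-pass buffer state machine: characters are accumulated into a token buffer and a boolean flag closes each token one character later, so no indices or slices are used.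
import Mathlib
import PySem

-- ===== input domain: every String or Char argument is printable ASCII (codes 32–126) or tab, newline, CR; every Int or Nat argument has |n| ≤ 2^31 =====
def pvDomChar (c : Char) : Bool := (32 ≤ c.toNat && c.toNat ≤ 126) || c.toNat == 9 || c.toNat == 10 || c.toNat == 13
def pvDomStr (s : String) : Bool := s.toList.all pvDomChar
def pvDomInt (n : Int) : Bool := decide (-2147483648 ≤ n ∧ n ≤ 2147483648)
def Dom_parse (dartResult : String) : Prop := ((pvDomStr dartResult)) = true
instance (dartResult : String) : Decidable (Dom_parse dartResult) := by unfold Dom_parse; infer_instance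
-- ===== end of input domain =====

-- B replaces A's index/slice scan with a buffer-and-flag state machine (tokens closed one character late); same cost, no speed claim.

-- ===== PORT A =====
-- A's for-loop over range(len(dartResult)) as structural recursion on the index;
-- string slices are PySem.List.slice on the char list, wrapped back with String.ofList.
def parseLoop (cs : List Char) (i : Nat) (prev : Int) (acc : List String) : List String :=
  if h : i < cs.length then
    if cs[i] ∈ (['S', 'D', 'T'] : List Char) then
      -- short-circuit `i+1 < len and dartResult[i+1] in ['*','#']`
      if i + 1 < cs.length && decide (cs.getD (i + 1) ' ' ∈ (['*', '#'] : List Char)) then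
        parseLoop cs (i + 1) ((i : Int) + 1)
          (acc ++ [String.ofList (if prev = -1 then PySem.List.slice cs none (some ((i : Int) + 1 + 1))
                              else PySem.List.slice cs (some (prev + 1)) (some ((i : Int) + 1 + 1)))])
      else
        parseLoop cs (i + 1) ((i : Int))
          (acc ++ [String.ofList (if prev = -1 then PySem.List.slice cs none (some ((i : Int) + 1))
                              else PySem.List.slice cs (some (prev + 1)) (some ((i : Int) + 1)))])
    else
      parseLoop cs (i + 1) prev acc
  else acc
termination_by cs.length - i

def parse (dartResult : String) : List String :=
  parseLoop dartResult.toList 0 (-1) []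

-- ===== PORT B =====
-- one fold step of Source B's loop: state = (tokens, current buffer, pending flag)
def parseAltStep (st : List String × List Char × Bool) (ch : Char) :
    List String × List Char × Bool :=
  match st with
  | (tokens, buf, pending) =>
    if pending then
      if ch ∈ (['*', '#'] : List Char) then
        (tokens ++ [String.ofList (buf ++ [ch])], [], false)
      else
        (tokens ++ [String.ofList buf], [ch], decide (ch ∈ (['S', 'D', 'T'] : List Char)))
    else
      (tokens, buf ++ [ch], decide (ch ∈ (['S', 'D', 'T'] : List Char)))

def parse_alt (dartResult : String) : List String :=
  match dartResult.toList.foldl parseAltStep ([], [], false) with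
  | (tokens, buf, pending) => if pending then tokens ++ [String.ofList buf] else tokens

-- ===== PRECONDITION & SPEC =====
def Spec_parse (dartResult : String) (out : List String) : Prop := out = parse_alt dartResult
instance (dartResult : String) (out : List String) : Decidable (Spec_parse dartResult out) := by unfold Spec_parse; infer_instance

-- ===== CLAIM (what is proved, stated in full; the proofs are below) =====
def Claim_equal_parse : Prop := ∀ (dartResult : String), Dom_parse dartResult → Spec_parse dartResult (parse dartResult)

-- ===== LEMMAS AND PROOFS =====

-- A's two slice branches collapse to drop/take when prev = e - 1 with e : Nat
lemma sliceBranch (cs : List Char) (e b : Nat) :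
    (if (e : Int) - 1 = -1 then PySem.List.slice cs none (some (b : Int))
     else PySem.List.slice cs (some ((e : Int) - 1 + 1)) (some (b : Int)))
      = (cs.drop e).take (b - e) := by
  rcases Nat.eq_zero_or_pos e with h | h
  · subst h; simp [PySem.List.slice_to_natCast]
  · have h1 : (e : Int) - 1 ≠ -1 := by omega
    have h2 : (e : Int) - 1 + 1 = (e : Int) := by ring
    simp [h1, h2, PySem.List.slice_natCast]

-- appending the next char extends the current buffer slice by one
lemma takeSnoc (cs : List Char) (e i : Nat) (he : e ≤ i) (hi : i < cs.length) :
    (cs.drop e).take (i - e) ++ [cs[i]] = (cs.drop e).take (i + 1 - e) := by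
  have h1 : i + 1 - e = (i - e) + 1 := by omega
  have h2 : (cs.drop e)[i - e]? = some cs[i] := by
    rw [List.getElem?_drop]
    have : e + (i - e) = i := by omega
    rw [this, List.getElem?_eq_getElem hi]
  rw [h1, List.take_add_one, h2]
  rfl

-- flush a final B state
def flushB (st : List String × List Char × Bool) : List String :=
  match st with
  | (tokens, buf, pending) => if pending then tokens ++ [String.ofList buf] else tokens

lemma loop_eq (cs : List Char) (i e : Nat) (acc : List String) (he : e ≤ i) :
    parseLoop cs i ((e : Int) - 1) acc
      = flushB ((cs.drop i).foldl parseAltStep (acc, (cs.drop e).take (i - e), false)) := by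
  by_cases h : i < cs.length
  · have hdrop : cs.drop i = cs[i] :: cs.drop (i + 1) := List.drop_eq_getElem_cons h
    rw [parseLoop]
    simp only [h, dif_pos]
    by_cases hc : cs[i] ∈ (['S', 'D', 'T'] : List Char)
    · by_cases hb : i + 1 < cs.length ∧ cs.getD (i + 1) ' ' ∈ (['*', '#'] : List Char)
      · -- bonus case: A emits the token and skips the bonus index; B consumes letter then bonus
        obtain ⟨hb1, hb2⟩ := hb
        have hget : cs.getD (i + 1) ' ' = cs[i + 1] := List.getD_eq_getElem cs ' ' hb1
        rw [hget] at hb2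
        have hbonus : (i + 1 < cs.length && decide (cs.getD (i + 1) ' ' ∈ (['*', '#'] : List Char))) = true := by
          simp [hb1, hb2]
        rw [if_pos hc, if_pos hbonus]
        have hcast : (i : Int) + 1 + 1 = ((i + 1 + 1 : Nat) : Int) := by push_cast; ring
        rw [hcast, sliceBranch cs e (i + 1 + 1)]
        have hnotSDT : cs[i + 1] ∉ (['S', 'D', 'T'] : List Char) := by
          rcases List.mem_cons.mp hb2 with h' | h'
          · rw [h']; decide
          · have h'' : cs[i + 1] = '#' := by simpa using h'
            rw [h'']; decide
        -- A's next iteration (at the bonus character) is a no-op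
        rw [parseLoop, dif_pos hb1, if_neg hnotSDT]
        have hprev : (i : Int) + 1 = ((i + 1 + 1 : Nat) : Int) - 1 := by push_cast; ring
        rw [hprev, loop_eq cs (i + 1 + 1) (i + 1 + 1) _ le_rfl]
        -- B's two fold steps
        rw [hdrop, List.drop_eq_getElem_cons hb1]
        simp only [List.foldl_cons]
        have s1 : parseAltStep (acc, (cs.drop e).take (i - e), false) cs[i]
            = (acc, (cs.drop e).take (i - e) ++ [cs[i]], true) := by
          simp [parseAltStep, hc]
        have s2 : parseAltStep (acc, (cs.drop e).take (i - e) ++ [cs[i]], true) cs[i + 1]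
            = (acc ++ [String.ofList (((cs.drop e).take (i - e) ++ [cs[i]]) ++ [cs[i + 1]])], [], false) := by
          simp [parseAltStep, hb2]
        rw [s1, s2, takeSnoc cs e i he h, takeSnoc cs e (i + 1) (by omega) hb1]
        simp only [Nat.sub_self, List.take_zero]
      · -- no-bonus case: A emits the token ending at the letter; B flags pending and emits one step later
        have hbonus : (i + 1 < cs.length && decide (cs.getD (i + 1) ' ' ∈ (['*', '#'] : List Char))) = false := by
          rcases Nat.lt_or_ge (i + 1) cs.length with h1 | h1
          · exact Bool.and_eq_false_iff.mpr (Or.inr (decide_eq_false (fun hm => hb ⟨h1, hm⟩)))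
          · exact Bool.and_eq_false_iff.mpr (Or.inl (decide_eq_false (by omega)))
        rw [if_pos hc, if_neg (fun hx => by rw [hbonus] at hx; simp at hx)]
        have hcast : (i : Int) + 1 = ((i + 1 : Nat) : Int) := by push_cast; ring
        rw [hcast, sliceBranch cs e (i + 1)]
        have hprev : (i : Int) = ((i + 1 : Nat) : Int) - 1 := by push_cast; ring
        rw [hprev, loop_eq cs (i + 1) (i + 1) _ le_rfl]
        rw [hdrop]
        simp only [List.foldl_cons, Nat.sub_self, List.take_zero]
        have s1 : parseAltStep (acc, (cs.drop e).take (i - e), false) cs[i]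
            = (acc, (cs.drop e).take (i - e) ++ [cs[i]], true) := by
          simp [parseAltStep, hc]
        rw [s1, takeSnoc cs e i he h]
        rcases Nat.lt_or_ge (i + 1) cs.length with h1 | h1
        · have hnb : cs[i + 1] ∉ (['*', '#'] : List Char) := by
            intro hm
            exact hb ⟨h1, by rw [List.getD_eq_getElem cs ' ' h1]; exact hm⟩
          rw [List.drop_eq_getElem_cons h1]
          simp only [List.foldl_cons]
          have e1 : parseAltStep (acc ++ [String.ofList ((cs.drop e).take (i + 1 - e))], [], false) cs[i + 1]
              = (acc ++ [String.ofList ((cs.drop e).take (i + 1 - e))], [cs[i + 1]],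
                 decide (cs[i + 1] ∈ (['S', 'D', 'T'] : List Char))) := by
            simp [parseAltStep]
          have e2 : parseAltStep (acc, (cs.drop e).take (i + 1 - e), true) cs[i + 1]
              = (acc ++ [String.ofList ((cs.drop e).take (i + 1 - e))], [cs[i + 1]],
                 decide (cs[i + 1] ∈ (['S', 'D', 'T'] : List Char))) := by
            simp [parseAltStep, hnb]
          rw [e1, e2]
        · rw [List.drop_eq_nil_of_le h1]
          rfl
    · -- not a letter: both sides just extend the scan
      rw [if_neg hc]
      rw [loop_eq cs (i + 1) e acc (by omega), hdrop]
      simp only [List.foldl_cons]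
      have s1 : parseAltStep (acc, (cs.drop e).take (i - e), false) cs[i]
          = (acc, (cs.drop e).take (i + 1 - e), false) := by
        rw [← takeSnoc cs e i he h]
        simp [parseAltStep, hc]
      rw [s1]
  · have hnil : cs.drop i = [] := List.drop_eq_nil_of_le (by omega)
    rw [parseLoop]
    simp [h, hnil, flushB]
termination_by cs.length - i
decreasing_by all_goals omega

-- ===== VERDICT (by name: the statement is the Claim_ definition above) =====
theorem parse_spec : Claim_equal_parse := by
  intro s _
  show parse s = parse_alt s
  have h := loop_eq s.toList 0 0 [] (le_refl 0)
  simpa [parse, parse_alt, flushB] using h
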